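-- pv_equiv track=rewrite | github.com/siryofat/adventjs_2025 | python/reto12.py | elf_battle
-- ===== SOURCE A (Python) =====
-- def elf_battle(elf1: str, elf2: str) -> int:
--     RULES = {
--         "A": {"A": (1, 1), "B": (0, 0), "F": (2, 1)},
--         "B": {"A": (0, 0), "B": (0, 0), "F": (2, 0)},
--         "F": {"A": (1, 2), "B": (0, 2), "F": (2, 2)},
--     }
--
--     hp1 = 3
--     hp2 = 3
--
--     for atk1, atk2 in zip(elf1, elf2):
--         dmg1, dmg2 = RULES[atk1][atk2]
--         hp1 -= dmg1
--         hp2 -= dmg2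
--         if hp1 <= 0 and hp2 <= 0:
--             return 0
--         elif hp1 <= 0:
--             return 2
--         elif hp2 <= 0:
--             return 1
--
--     if hp1 == hp2:
--         return 0
--     elif hp1 < hp2:
--         return 2
--     else:
--         return 1
-- ===== SOURCE B (Python) =====
-- def elf_battle(elf1: str, elf2: str) -> int:
--     POWER = {"A": 1, "B": 0, "F": 2}
--
--     def fight(moves, d1, d2):
--         # d1/d2 = total damage suffered so far; 3 damage is lethal
--         if d1 >= 3 or d2 >= 3:
--             return (2 if d2 < 3 else 0) if d1 >= 3 else 1
--         if not moves:
--             return 0 if d1 == d2 else (2 if d1 > d2 else 1)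
--         m1, m2 = moves[0]
--         hit1 = 0 if (m2 == "A" and m1 == "B") else POWER[m2]
--         hit2 = 0 if (m1 == "A" and m2 == "B") else POWER[m1]
--         return fight(moves[1:], d1 + hit1, d2 + hit2)
--
--     return fight(list(zip(elf1, elf2)), 0, 0)
-- ===== Notes on version B (the rewrite author's own statement) =====
-- stated objective: simpler
-- what changed: Replaces the 9-entry nested RULES table and the imperative HP-countdown loop with early-return branches by a structural recursion over the zipped move pairs that accumulates damage suffered and derives each hit from a 3-entry power map plus the single block exception (A blocked by B), with one unified knockout check at the head of each call.
-- outside the precondition, e.g. on elf_battle('FFX', 'FFA'): A returns 0, B returns 0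
import Mathlib
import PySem

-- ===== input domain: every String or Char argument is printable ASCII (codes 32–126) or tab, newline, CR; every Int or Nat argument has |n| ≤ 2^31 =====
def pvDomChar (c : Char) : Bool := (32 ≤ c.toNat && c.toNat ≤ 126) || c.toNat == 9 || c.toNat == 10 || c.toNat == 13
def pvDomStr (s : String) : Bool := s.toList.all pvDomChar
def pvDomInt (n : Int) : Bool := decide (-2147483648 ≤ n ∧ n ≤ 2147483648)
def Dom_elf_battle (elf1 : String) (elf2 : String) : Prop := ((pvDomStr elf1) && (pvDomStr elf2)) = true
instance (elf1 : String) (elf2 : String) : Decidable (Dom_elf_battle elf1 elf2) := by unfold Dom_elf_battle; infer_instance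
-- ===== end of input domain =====

-- B replaces A's 9-entry nested RULES table and imperative HP-countdown loop by a
-- structural recursion that accumulates damage suffered and derives each hit from a
-- small power map plus one block-exception; objective: simpler.

-- ===== PORT A =====
-- A's nested RULES dict, literally.
def pvRULES : PySem.Dict Char (PySem.Dict Char (Int × Int)) :=
  PySem.Dict.ofList
    [ ('A', PySem.Dict.ofList [('A', (1, 1)), ('B', (0, 0)), ('F', (2, 1))])
    , ('B', PySem.Dict.ofList [('A', (0, 0)), ('B', (0, 0)), ('F', (2, 0))])
    , ('F', PySem.Dict.ofList [('A', (1, 2)), ('B', (0, 2)), ('F', (2, 2))]) ]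

-- the for-loop over zip(elf1, elf2) with early returns; a missing key (KeyError in
-- Python) is excluded by Pre_elf_battle, the getD default is never reached there.
def elf_battle_go : List (Char × Char) → Int → Int → Int
  | [], hp1, hp2 =>
      if hp1 = hp2 then 0 else if hp1 < hp2 then 2 else 1
  | (atk1, atk2) :: rest, hp1, hp2 =>
      let dd := (pvRULES.getD atk1 PySem.Dict.empty).getD atk2 (0, 0)
      let hp1' := hp1 - dd.1
      let hp2' := hp2 - dd.2
      if hp1' ≤ 0 ∧ hp2' ≤ 0 then 0
      else if hp1' ≤ 0 then 2
      else if hp2' ≤ 0 then 1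
      else elf_battle_go rest hp1' hp2'

def elf_battle (elf1 : String) (elf2 : String) : Int :=
  elf_battle_go (elf1.toList.zip elf2.toList) 3 3

-- ===== PORT B =====
def pvPOWER : PySem.Dict Char Int := PySem.Dict.ofList [('A', 1), ('B', 0), ('F', 2)]

-- Source B's fight: recursion over the move pairs, accumulating damage suffered;
-- getD's default stands for the KeyError excluded by Pre_elf_battle.
def elf_battle_fight : List (Char × Char) → Int → Int → Int
  | moves, d1, d2 =>
      if 3 ≤ d1 ∨ 3 ≤ d2 then
        if 3 ≤ d1 then (if d2 < 3 then 2 else 0) else 1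
      else
        match moves with
        | [] => if d1 = d2 then 0 else if d1 > d2 then 2 else 1
        | (m1, m2) :: rest =>
            let hit1 := if m2 = 'A' ∧ m1 = 'B' then 0 else pvPOWER.getD m2 0
            let hit2 := if m1 = 'A' ∧ m2 = 'B' then 0 else pvPOWER.getD m1 0
            elf_battle_fight rest (d1 + hit1) (d2 + hit2)

def elf_battle_alt (elf1 : String) (elf2 : String) : Int :=
  elf_battle_fight (elf1.toList.zip elf2.toList) 0 0

-- ===== PRECONDITION & SPEC =====
-- Pre_ requires every simultaneous pair of moves (the zipped prefix) to be a valid move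
-- A/B/F: on an invalid pair both programs raise KeyError when the pair is reached, and a
-- few fights that happen to end before reaching a later invalid character are excluded
-- with them to keep the condition closed-form (A and B return the same value there too).
def Pre_elf_battle (elf1 : String) (elf2 : String) : Prop :=
  ((elf1.toList.zip elf2.toList).all (fun p =>
      (p.1 = 'A' ∨ p.1 = 'B' ∨ p.1 = 'F') ∧ (p.2 = 'A' ∨ p.2 = 'B' ∨ p.2 = 'F')))
instance (elf1 : String) (elf2 : String) : Decidable (Pre_elf_battle elf1 elf2) := by
  unfold Pre_elf_battle; infer_instance

def pvWitness_elf_battle : String × String := ("AFB", "FBA")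

def Spec_elf_battle (elf1 : String) (elf2 : String) (out : Int) : Prop := out = elf_battle_alt elf1 elf2
instance (elf1 : String) (elf2 : String) (out : Int) : Decidable (Spec_elf_battle elf1 elf2 out) := by unfold Spec_elf_battle; infer_instance

-- ===== CLAIM (what is proved, stated in full; the proofs are below) =====
def Claim_equal_elf_battle : Prop := ∀ (elf1 : String) (elf2 : String), Dom_elf_battle elf1 elf2 → Pre_elf_battle elf1 elf2 → Spec_elf_battle elf1 elf2 (elf_battle elf1 elf2)

-- ===== LEMMAS AND PROOFS =====

-- unfolding lemmas for B's recursion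
theorem fight_dead (moves : List (Char × Char)) (d1 d2 : Int) (h : 3 ≤ d1 ∨ 3 ≤ d2) :
    elf_battle_fight moves d1 d2 = if 3 ≤ d1 then (if d2 < 3 then 2 else 0) else 1 := by
  rw [elf_battle_fight.eq_def]; dsimp only; rw [if_pos h]

theorem fight_nil (d1 d2 : Int) (h1 : d1 < 3) (h2 : d2 < 3) :
    elf_battle_fight [] d1 d2 = if d1 = d2 then 0 else if d1 > d2 then 2 else 1 := by
  rw [elf_battle_fight.eq_def]; dsimp only; rw [if_neg (show ¬(3 ≤ d1 ∨ 3 ≤ d2) by omega)]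

theorem fight_cons (m1 m2 : Char) (rest : List (Char × Char)) (d1 d2 : Int)
    (h1 : d1 < 3) (h2 : d2 < 3) :
    elf_battle_fight ((m1, m2) :: rest) d1 d2 =
      elf_battle_fight rest
        (d1 + if m2 = 'A' ∧ m1 = 'B' then 0 else pvPOWER.getD m2 0)
        (d2 + if m1 = 'A' ∧ m2 = 'B' then 0 else pvPOWER.getD m1 0) := by
  rw [elf_battle_fight.eq_def]; dsimp only; rw [if_neg (show ¬(3 ≤ d1 ∨ 3 ≤ d2) by omega)]

-- main invariant: on valid move lists, A's HP-countdown loop and B's damage-accumulation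
-- recursion agree, relating hp_i = 3 - d_i while both elves are still alive.
theorem go_eq_fight (pairs : List (Char × Char))
    (hv : pairs.all (fun p =>
      (p.1 = 'A' ∨ p.1 = 'B' ∨ p.1 = 'F') ∧ (p.2 = 'A' ∨ p.2 = 'B' ∨ p.2 = 'F')))
    (d1 d2 : Int) (h1 : d1 < 3) (h2 : d2 < 3) :
    elf_battle_go pairs (3 - d1) (3 - d2) = elf_battle_fight pairs d1 d2 := by
  induction pairs generalizing d1 d2 with
  | nil =>
      rw [fight_nil d1 d2 h1 h2]
      simp only [elf_battle_go]
      split_ifs <;> omega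
  | cons p rest ih =>
      obtain ⟨m1, m2⟩ := p
      simp only [List.all_cons, Bool.and_eq_true, decide_eq_true_eq] at hv
      obtain ⟨⟨hm1, hm2⟩, hrest⟩ := hv
      -- the two hit computations coincide on each of the 9 valid pairs
      have hdd : ((pvRULES.getD m1 PySem.Dict.empty).getD m2 (0, 0)).1
            = (if m2 = 'A' ∧ m1 = 'B' then 0 else pvPOWER.getD m2 0)
          ∧ ((pvRULES.getD m1 PySem.Dict.empty).getD m2 (0, 0)).2
            = (if m1 = 'A' ∧ m2 = 'B' then 0 else pvPOWER.getD m1 0) := by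
        rcases hm1 with h | h | h <;> rcases hm2 with h' | h' | h' <;> subst h <;> subst h' <;> decide
      rw [fight_cons m1 m2 rest d1 d2 h1 h2, ← hdd.1, ← hdd.2]
      simp only [elf_battle_go]
      set e1 := ((pvRULES.getD m1 PySem.Dict.empty).getD m2 (0, 0)).1 with he1
      set e2 := ((pvRULES.getD m1 PySem.Dict.empty).getD m2 (0, 0)).2 with he2
      by_cases hKO : 3 ≤ d1 + e1 ∨ 3 ≤ d2 + e2
      · rw [fight_dead rest _ _ hKO]
        split_ifs <;> omega
      · rw [if_neg (by omega), if_neg (by omega), if_neg (by omega)]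
        have hl : 3 - d1 - e1 = 3 - (d1 + e1) := by ring
        have hr : 3 - d2 - e2 = 3 - (d2 + e2) := by ring
        rw [hl, hr]
        exact ih hrest _ _ (by omega) (by omega)

-- ===== VERDICT (by name: the statement is the Claim_ definition above) =====
theorem elf_battle_spec : Claim_equal_elf_battle := by
  intro elf1 elf2 _ hpre
  unfold Spec_elf_battle elf_battle elf_battle_alt
  have h30 : (3 : Int) = 3 - 0 := by norm_num
  rw [h30, go_eq_fight _ (by simpa [Pre_elf_battle] using hpre) 0 0 (by norm_num) (by norm_num)]
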